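-- pv_equiv track=rewrite | github.com/pypi-data/pypi-mirror-19 | packages/xlsx_to_handontable/xlsx_to_handontable-0.1.0-py2.py3-none-any.whl/xlsx_to_handontable/count_col.py | _go
-- ===== SOURCE A (Python) =====
-- def _go(l):
--     n = 0
--     for i in l:
--         if i is not None and n:
--             yield n
--             n = 0
--         n += 1
--     if n:
--         yield n
-- ===== SOURCE B (Python) =====
-- def _go(l):
--     if l:
--         points = [0] + [i for i, v in enumerate(l) if i and v is not None] + [len(l)]
--         for a, b in zip(points, points[1:]):
--             yield b - a
-- ===== Notes on version B (the rewrite author's own statement) =====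
-- stated objective: alternative
-- what changed: A streams one counter through the list, yielding it at each non-None marker; B first builds the explicit list of segment boundary indices (index zero, every later index holding a non-None value, and the length) and then yields consecutive differences of that list.
import Mathlib
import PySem

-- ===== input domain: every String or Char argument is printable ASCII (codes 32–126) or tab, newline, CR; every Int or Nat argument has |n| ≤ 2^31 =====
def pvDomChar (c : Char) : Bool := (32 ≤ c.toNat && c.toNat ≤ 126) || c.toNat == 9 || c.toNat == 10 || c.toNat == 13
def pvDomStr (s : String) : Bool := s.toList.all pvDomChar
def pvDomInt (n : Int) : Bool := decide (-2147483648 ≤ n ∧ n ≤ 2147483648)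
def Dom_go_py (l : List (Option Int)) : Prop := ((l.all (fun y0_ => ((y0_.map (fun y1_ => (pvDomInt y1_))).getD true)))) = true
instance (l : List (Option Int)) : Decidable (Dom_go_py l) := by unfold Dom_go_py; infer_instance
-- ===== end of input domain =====

-- B replaces A's streaming counter by an explicit boundary-index list whose consecutive
-- differences are the run lengths (alternative decomposition, same cost).

-- ===== PORT A =====
def go_py (l : List (Option Int)) : List Int :=
  let st := l.foldl (fun (st : List Int × Int) i =>
    let st := if i.isSome && st.2 != 0 then (st.1 ++ [st.2], (0 : Int)) else st
    (st.1, st.2 + 1)) ([], 0)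
  if st.2 != 0 then st.1 ++ [st.2] else st.1

-- ===== PORT B =====
def go_py_alt (l : List (Option Int)) : List Int :=
  if l = [] then []
  else
    let points : List Int :=
      0 :: (((PySem.List.enumerate l 0).filter (fun p => p.1 != 0 && p.2.isSome)).map (·.1))
        ++ [(l.length : Int)]
    (points.zip points.tail).map (fun p => p.2 - p.1)

-- ===== PRECONDITION & SPEC =====
def Spec_go_py (l : List (Option Int)) (out : List Int) : Prop := out = go_py_alt l
instance (l : List (Option Int)) (out : List Int) : Decidable (Spec_go_py l out) := by unfold Spec_go_py; infer_instance

-- ===== CLAIM (what is proved, stated in full; the proofs are below) =====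
def Claim_equal_go_py : Prop := ∀ (l : List (Option Int)), Dom_go_py l → Spec_go_py l (go_py l)

-- ===== LEMMAS AND PROOFS =====

/-- The common specification: run lengths of `xs`, with `n` elements already pending. -/
def goRuns : List (Option Int) → Int → List Int
  | [], n => [n]
  | x :: xs, n => if x.isSome then n :: goRuns xs 1 else goRuns xs (n + 1)

def pvStep (st : List Int × Int) (i : Option Int) : List Int × Int :=
  let st := if i.isSome && st.2 != 0 then (st.1 ++ [st.2], (0 : Int)) else st
  (st.1, st.2 + 1)

def pvFinal (st : List Int × Int) : List Int := if st.2 != 0 then st.1 ++ [st.2] else st.1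

def pvGaps (pts : List Int) : List Int := (pts.zip pts.tail).map (fun p => p.2 - p.1)

def pvMarks (s : Int) (xs : List (Option Int)) : List Int :=
  ((PySem.List.enumerate xs s).filter (fun p => p.2.isSome)).map (·.1)

lemma foldA (xs : List (Option Int)) : ∀ (out : List Int) (n : Int), 1 ≤ n →
    pvFinal (xs.foldl pvStep (out, n)) = out ++ goRuns xs n := by
  induction xs with
  | nil =>
    intro out n hn
    simp [pvFinal, goRuns]
    omega
  | cons x xs ih =>
    intro out n hn
    have hn0 : (n != 0) = true := by simp; omega
    cases hx : x.isSome with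
    | true =>
      have : pvStep (out, n) x = (out ++ [n], 1) := by simp [pvStep, hx, hn0]
      rw [List.foldl_cons, this, ih _ 1 (by omega)]
      simp [goRuns, hx]
    | false =>
      have : pvStep (out, n) x = (out, n + 1) := by simp [pvStep, hx]
      rw [List.foldl_cons, this, ih _ (n + 1) (by omega)]
      simp [goRuns, hx]

lemma gaps_cons_cons (a b : Int) (rest : List Int) :
    pvGaps (a :: b :: rest) = (b - a) :: pvGaps (b :: rest) := by
  simp [pvGaps]

lemma marks_cons (s : Int) (x : Option Int) (xs : List (Option Int)) :
    pvMarks s (x :: xs) = if x.isSome then s :: pvMarks (s + 1) xs else pvMarks (s + 1) xs := by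
  cases hx : x.isSome <;> simp [pvMarks, PySem.List.enumerate_cons, hx]

lemma gapsB (xs : List (Option Int)) : ∀ (s p : Int),
    pvGaps (p :: pvMarks s xs ++ [s + xs.length]) = goRuns xs (s - p) := by
  induction xs with
  | nil =>
    intro s p
    simp [pvMarks, PySem.List.enumerate, pvGaps, goRuns]
  | cons x xs ih =>
    intro s p
    have hlen : ((s : Int) + (((x :: xs).length : Nat) : Int)) = (s + 1) + (xs.length : Int) := by
      simp only [List.length_cons]; push_cast; ring
    rw [marks_cons]
    cases hx : x.isSome with
    | true =>
      simp only [if_true, List.cons_append]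
      rw [hlen, gaps_cons_cons]
      simp only [goRuns, hx, if_true]
      congr 1
      have := ih (s + 1) s
      rw [show (s + 1 : Int) - s = 1 by ring] at this
      exact this
    | false =>
      simp only [Bool.false_eq_true, if_false]
      rw [hlen]
      have := ih (s + 1) p
      rw [show (s + 1 : Int) - p = (s - p) + 1 by ring] at this
      rw [this]
      simp [goRuns, hx]

lemma filter_enumerate_pos (xs : List (Option Int)) : ∀ (s : Int), 1 ≤ s →
    (PySem.List.enumerate xs s).filter (fun p => p.1 != 0 && p.2.isSome)
      = (PySem.List.enumerate xs s).filter (fun p => p.2.isSome) := by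
  induction xs with
  | nil => intro s hs; simp [PySem.List.enumerate]
  | cons x xs ih =>
    intro s hs
    have hs0 : ((s : Int) != 0) = true := by simp; omega
    simp only [PySem.List.enumerate_cons, List.filter_cons, hs0, Bool.true_and]
    rw [ih (s + 1) (by omega)]

-- ===== VERDICT (by name: the statement is the Claim_ definition above) =====
theorem go_py_spec : Claim_equal_go_py := by
  intro l _
  unfold Spec_go_py
  cases l with
  | nil => simp [go_py, go_py_alt]
  | cons x xs =>
    have hA : go_py (x :: xs) = goRuns xs 1 := by
      show pvFinal ((x :: xs).foldl pvStep ([], 0)) = goRuns xs 1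
      have hstep : pvStep ([], 0) x = ([], 1) := by simp [pvStep]
      rw [List.foldl_cons, hstep, foldA xs [] 1 (by omega)]
      simp
    rw [hA]
    symm
    unfold go_py_alt
    rw [if_neg (by simp)]
    simp only [PySem.List.enumerate_cons]
    rw [show (0 : Int) + 1 = 1 by ring]
    have h0 : ((((0 : Int), x) :: PySem.List.enumerate xs 1).filter
          (fun p => p.1 != 0 && p.2.isSome))
        = (PySem.List.enumerate xs 1).filter (fun p => p.2.isSome) := by
      rw [List.filter_cons]
      simp only [show ((fun (p : Int × Option Int) => p.1 != 0 && p.2.isSome) ((0 : Int), x)) = false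
        by simp, Bool.false_eq_true, if_false]
      exact filter_enumerate_pos xs 1 (by omega)
    rw [h0]
    show pvGaps ((0 : Int) :: pvMarks 1 xs ++ [(((x :: xs).length : Nat) : Int)]) = goRuns xs 1
    rw [show ((((x :: xs).length : Nat) : Int)) = (1 : Int) + (xs.length : Int) by
      simp only [List.length_cons]; push_cast; ring]
    have h1 := gapsB xs 1 0
    rw [show (1 : Int) - 0 = 1 by ring] at h1
    exact h1
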